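-- pv_equiv track=rewrite | github.com/sorghumking/aoc2018 | day6.py | get_plot
-- ===== SOURCE A (Python) =====
-- def get_plot(coordDict, x0, x1, y0, y1):
--     plot = []
--     for y in range(y0, y1):
--         for x in range(x0, x1):
--             closest = find_closest((x,y), coordDict.values())
--             if closest:
--                 for k,v in coordDict.items():
--                     if v == closest:
--                         if v == (x,y):
--                             plot.append(k)
--                         else:
--                             plot.append(k.lower())
--                         break
--             else:
--                 plot.append('.')
--     return plot
--
-- def find_closest(pt, coords):
--     dists = {}
--     for c in coords:
--         dists[c] = dist(pt, c)
--         if dists[c] == 0: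
--             return c
--     mindist = min(dists.items(), key=lambda x:x[1]) # find min dist
--     if len([d for d in dists.values() if d == mindist[1]]) > 1:
--         return None # more than one closest
--     else:
--         return mindist[0]
--
-- def dist(pt1, pt2):
--     return abs(pt1[0] - pt2[0]) + abs(pt1[1] - pt2[1])
-- ===== SOURCE B (Python) =====
-- def get_plot(coordDict, x0, x1, y0, y1):
--     # first key for each distinct coordinate, in insertion order
--     label = {}
--     for k, v in coordDict.items():
--         if v not in label:
--             label[v] = k
--     coords = list(label)
--     plot = []
--     for y in range(y0, y1):
--         for x in range(x0, x1):
--             best = None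
--             bestd = None
--             tie = False
--             for c in coords:
--                 d = abs(c[0] - x) + abs(c[1] - y)
--                 if bestd is None or d < bestd:
--                     best, bestd, tie = c, d, False
--                 elif d == bestd:
--                     tie = True
--             if best is None or tie:
--                 plot.append('.')
--             elif best == (x, y):
--                 plot.append(label[best])
--             else:
--                 plot.append(label[best].lower())
--     return plot
-- ===== Notes on version B (the rewrite author's own statement) =====
-- stated objective: alternative
-- what changed: B precomputes a first-wins coordinate-to-key map once and labels each cell with a single online min/tie scan over the distinct coordinates, instead of A's per-cell dict rebuild, min() pass, tie-count pass and key-lookup scan.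
-- outside the precondition, e.g. on get_plot({}, 0, 1, 0, 1): A raises ValueError, B returns ['.']
import Mathlib
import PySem

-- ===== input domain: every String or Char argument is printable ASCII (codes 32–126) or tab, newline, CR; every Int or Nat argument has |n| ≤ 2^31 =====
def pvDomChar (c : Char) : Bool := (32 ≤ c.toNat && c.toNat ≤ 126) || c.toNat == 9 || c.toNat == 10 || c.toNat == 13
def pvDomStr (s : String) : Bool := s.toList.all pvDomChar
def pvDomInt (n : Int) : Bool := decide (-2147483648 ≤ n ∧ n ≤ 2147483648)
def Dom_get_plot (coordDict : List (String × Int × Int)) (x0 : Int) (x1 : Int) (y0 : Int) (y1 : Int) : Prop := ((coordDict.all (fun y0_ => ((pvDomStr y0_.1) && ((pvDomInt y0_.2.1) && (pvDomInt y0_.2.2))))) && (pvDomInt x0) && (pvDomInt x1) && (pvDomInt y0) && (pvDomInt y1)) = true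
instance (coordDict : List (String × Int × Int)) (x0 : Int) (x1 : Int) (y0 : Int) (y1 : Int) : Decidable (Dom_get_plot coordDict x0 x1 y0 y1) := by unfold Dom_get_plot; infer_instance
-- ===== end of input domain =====

-- B replaces A's per-cell dict-building + min + tie-count + label-scan with a precomputed
-- first-wins coordinate→key map and a single online min/tie pass per cell (objective: alternative).

-- ===== PORT A =====
-- dist(pt1, pt2)
def pv_dist (pt1 pt2 : Int × Int) : Int := |pt1.1 - pt2.1| + |pt1.2 - pt2.2|

-- the loop of find_closest: builds the dists dict, early-returns c when dists[c] == 0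
def pv_fc_loop (pt : Int × Int) : List (Int × Int) → PySem.Dict (Int × Int) Int →
    Sum (Int × Int) (PySem.Dict (Int × Int) Int)
  | [], dists => .inr dists
  | c :: rest, dists =>
      let dists2 := dists.insert c (pv_dist pt c)
      if dists2.getD c 0 == 0 then .inl c else pv_fc_loop pt rest dists2

-- find_closest(pt, coords); Python raises ValueError (min of an empty dict) exactly when
-- coords = [] and no early return fires: that path returns none here and is excluded by Pre_.
def find_closest (pt : Int × Int) (coords : List (Int × Int)) : Option (Int × Int) :=
  match pv_fc_loop pt coords PySem.Dict.empty with
  | .inl c => some c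
  | .inr dists =>
    match PySem.List.min? dists.items (fun p => p.2) with
    | none => none
    | some mindist =>
        if 1 < (dists.values.filter (fun d => d == mindist.2)).length then none
        else some mindist.1

-- the 'for k,v in coordDict.items(): if v == closest: … break' loop
def pv_label_loop (pt closest : Int × Int) (plot : List String) :
    List (String × Int × Int) → List String
  | [] => plot
  | (k, v) :: rest =>
      if v == closest then
        (if v == pt then plot ++ [k] else plot ++ [PySem.Str.lower k])
      else pv_label_loop pt closest plot rest

def get_plot (coordDict : List (String × Int × Int)) (x0 : Int) (x1 : Int) (y0 : Int) (y1 : Int) : List String :=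
  (PySem.List.pyRange y0 y1 1).foldl (fun plot y =>
    (PySem.List.pyRange x0 x1 1).foldl (fun plot x =>
      match find_closest (x, y) (coordDict.map (fun p => p.2)) with
      | some closest => pv_label_loop (x, y) closest plot coordDict
      | none => plot ++ ["."]) plot) []

-- ===== PORT B =====
-- one step of B's online min/tie scan: state = (best coordinate with its distance, tie flag)
def pv_best_step (x y : Int) (st : Option ((Int × Int) × Int) × Bool) (c : Int × Int) :
    Option ((Int × Int) × Int) × Bool :=
  let d := |c.1 - x| + |c.2 - y|
  match st.1 with
  | none => (some (c, d), false)
  | some (_, bd) =>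
      if d < bd then (some (c, d), false)
      else if d == bd then (st.1, true) else st

def get_plot_alt (coordDict : List (String × Int × Int)) (x0 : Int) (x1 : Int) (y0 : Int) (y1 : Int) : List String :=
  let label := coordDict.foldl
      (fun d p => if d.contains p.2 then d else d.insert p.2 p.1) PySem.Dict.empty
  let coords := label.keys
  (PySem.List.pyRange y0 y1 1).foldl (fun plot y =>
    (PySem.List.pyRange x0 x1 1).foldl (fun plot x =>
      match coords.foldl (pv_best_step x y) (none, false) with
      | (none, _) => plot ++ ["."]
      | (some (b, _), tie) =>
          if tie then plot ++ ["."]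
          else if b == (x, y) then plot ++ [label.getD b ""]   -- label[b]: b ∈ coords = label.keys, so the lookup cannot miss
          else plot ++ [PySem.Str.lower (label.getD b "")]) plot) []

-- ===== PRECONDITION & SPEC =====
-- Pre_ excludes only the inputs where A raises: an empty coordDict together with a nonempty
-- grid makes find_closest call min() on an empty dict (ValueError).
def Pre_get_plot (coordDict : List (String × Int × Int)) (x0 : Int) (x1 : Int) (y0 : Int) (y1 : Int) : Prop :=
  coordDict ≠ [] ∨ x1 ≤ x0 ∨ y1 ≤ y0
instance (coordDict : List (String × Int × Int)) (x0 : Int) (x1 : Int) (y0 : Int) (y1 : Int) : Decidable (Pre_get_plot coordDict x0 x1 y0 y1) := by unfold Pre_get_plot; infer_instance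
def pvWitness_get_plot : (List (String × Int × Int)) × Int × Int × Int × Int :=
  ([("A", (0, 0)), ("B", (2, 1))], 0, 3, 0, 2)

def Spec_get_plot (coordDict : List (String × Int × Int)) (x0 : Int) (x1 : Int) (y0 : Int) (y1 : Int) (out : List String) : Prop := out = get_plot_alt coordDict x0 x1 y0 y1
instance (coordDict : List (String × Int × Int)) (x0 : Int) (x1 : Int) (y0 : Int) (y1 : Int) (out : List String) : Decidable (Spec_get_plot coordDict x0 x1 y0 y1 out) := by unfold Spec_get_plot; infer_instance

-- ===== CLAIM (what is proved, stated in full; the proofs are below) =====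
def Claim_equal_get_plot : Prop := ∀ (coordDict : List (String × Int × Int)) (x0 : Int) (x1 : Int) (y0 : Int) (y1 : Int), Dom_get_plot coordDict x0 x1 y0 y1 → Pre_get_plot coordDict x0 x1 y0 y1 → Spec_get_plot coordDict x0 x1 y0 y1 (get_plot coordDict x0 x1 y0 y1)

-- ===== LEMMAS AND PROOFS =====
theorem pv_dist_eq_zero (pt c : Int × Int) : pv_dist pt c = 0 ↔ c = pt := by
  rcases abs_cases (pt.1 - c.1) with ⟨h1, h1'⟩ | ⟨h1, h1'⟩ <;>
  rcases abs_cases (pt.2 - c.2) with ⟨h2, h2'⟩ | ⟨h2, h2'⟩ <;>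
  simp [pv_dist, Prod.ext_iff, h1, h2] <;> omega

theorem pv_dist_nonneg (pt c : Int × Int) : 0 ≤ pv_dist pt c := by
  simp only [pv_dist]; positivity

theorem pv_dist_comm' (x y : Int) (c : Int × Int) :
    |c.1 - x| + |c.2 - y| = pv_dist (x, y) c := by
  simp [pv_dist, abs_sub_comm]

theorem min?_snoc_none {α : Type} {l : List α} {f : α → Int} (c : α)
    (h : PySem.List.min? l f = none) : PySem.List.min? (l ++ [c]) f = some c := by
  unfold PySem.List.min? at h ⊢
  rw [List.foldl_append, h]; rfl

theorem min?_snoc_some {α : Type} {l : List α} {f : α → Int} {a : α} (c : α)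
    (h : PySem.List.min? l f = some a) :
    PySem.List.min? (l ++ [c]) f = if f c < f a then some c else some a := by
  unfold PySem.List.min? at h ⊢
  rw [List.foldl_append, h]; rfl

theorem min?_map_pair {α : Type} (l : List α) (f : α → Int) :
    PySem.List.min? (l.map (fun c => (c, f c))) (fun p => p.2) =
      (PySem.List.min? l f).map (fun c => (c, f c)) := by
  induction l using List.reverseRecOn with
  | nil => rfl
  | append_singleton l c ih =>
    cases h : PySem.List.min? l f with
    | none =>
      have h2 : (PySem.List.min? (l.map (fun c => (c, f c))) (fun p => p.2)) = none := by
        rw [ih, h]; rfl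
      rw [min?_snoc_none c h, List.map_append, List.map_cons, List.map_nil,
        min?_snoc_none (c, f c) h2]
      rfl
    | some a =>
      have h2 : (PySem.List.min? (l.map (fun c => (c, f c))) (fun p => p.2)) = some (a, f a) := by
        rw [ih, h]; rfl
      rw [min?_snoc_some c h, List.map_append, List.map_cons, List.map_nil,
        min?_snoc_some (c, f c) h2]
      by_cases hlt : f c < f a <;> simp [hlt]

-- A's find_closest loop completes (no early return) when pt is not among the coords
theorem fc_loop_no_zero (pt : Int × Int) (l : List (Int × Int)) (hpt : pt ∉ l) :
    ∀ d, pv_fc_loop pt l d = .inr (l.foldl (fun d c => d.insert c (pv_dist pt c)) d) := by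
  induction l with
  | nil => intro d; rfl
  | cons c rest ih =>
    intro d
    have hne : c ≠ pt := by rintro rfl; exact hpt (List.mem_cons_self)
    have hz : (pv_dist pt c == 0) = false := by
      simp only [beq_eq_false_iff_ne, ne_eq, pv_dist_eq_zero]; exact hne
    simp only [pv_fc_loop, PySem.Dict.getD_insert_self, hz, List.foldl_cons]
    exact ih (fun h => hpt (List.mem_cons_of_mem _ h)) _
-- A's find_closest loop early-returns pt itself when pt is among the coords
theorem fc_loop_zero (pt : Int × Int) (l : List (Int × Int)) (hpt : pt ∈ l) :
    ∀ d, pv_fc_loop pt l d = .inl pt := by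
  induction l with
  | nil => cases hpt
  | cons c rest ih =>
    intro d
    by_cases hc : c = pt
    · subst hc
      have hz : (pv_dist c c == 0) = true := by
        simp only [beq_iff_eq, pv_dist_eq_zero]
      simp only [pv_fc_loop, PySem.Dict.getD_insert_self, hz, if_true]
    · have hz : (pv_dist pt c == 0) = false := by
        simp only [beq_eq_false_iff_ne, ne_eq, pv_dist_eq_zero]; exact hc
      simp only [pv_fc_loop, PySem.Dict.getD_insert_self, hz]
      refine ih ?_ _
      rcases List.mem_cons.mp hpt with h | h
      · exact absurd h.symm hc
      · exact h

-- the dists dict built by A's loop: items = dedup of the coords paired with their distances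
theorem items_fold_insert (g : Int × Int → Int) (l : List (Int × Int)) :
    ∀ (m : List (Int × Int)),
      ((l.foldl (fun d c => d.insert c (g c)) ⟨m.map (fun c => (c, g c))⟩) :
          PySem.Dict (Int × Int) Int).items
        = (PySem.Set.update m l).map (fun c => (c, g c)) := by
  induction l with
  | nil => intro m; rfl
  | cons c rest ih =>
    intro m
    have hcont : (PySem.Dict.contains (⟨m.map (fun c => (c, g c))⟩ : PySem.Dict (Int × Int) Int) c)
        = m.contains c := by
      rw [Bool.eq_iff_iff]
      simp [PySem.Dict.contains, List.any_map, Function.comp]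
    by_cases hm : c ∈ m
    · have h1 : (PySem.Dict.contains (⟨m.map (fun c => (c, g c))⟩ : PySem.Dict (Int × Int) Int) c) = true := by
        rw [hcont]; exact List.contains_iff_mem.mpr hm
      have h2 : ((⟨m.map (fun c => (c, g c))⟩ : PySem.Dict (Int × Int) Int).insert c (g c))
          = ⟨m.map (fun c => (c, g c))⟩ := by
        apply PySem.Dict.ext
        rw [PySem.Dict.items_insert_of_contains _ _ h1]
        rw [List.map_map]
        apply List.map_congr_left
        intro a _
        simp only [Function.comp]
        by_cases hac : a = c
        · subst hac; simp
        · simp [hac]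
      have h3 : PySem.Set.add m c = m := by
        simp only [PySem.Set.add, PySem.Set.contains_eq_decide, hm, decide_true, if_true]
      simp only [List.foldl_cons, h2, PySem.Set.update] at *
      rw [h3]
      exact ih m
    · have h1 : (PySem.Dict.contains (⟨m.map (fun c => (c, g c))⟩ : PySem.Dict (Int × Int) Int) c) = false := by
        rw [hcont]; simp [hm]
      have h2 : ((⟨m.map (fun c => (c, g c))⟩ : PySem.Dict (Int × Int) Int).insert c (g c))
          = ⟨(m ++ [c]).map (fun c => (c, g c))⟩ := by
        apply PySem.Dict.ext
        rw [PySem.Dict.items_insert_of_not_contains _ _ h1]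
        simp
      have h3 : PySem.Set.add m c = m ++ [c] := by
        simp only [PySem.Set.add, PySem.Set.contains_eq_decide, hm, decide_false,
          Bool.false_eq_true, if_false]
      simp only [List.foldl_cons, h2, PySem.Set.update] at *
      rw [h3]
      exact ih (m ++ [c])

-- B's online scan computes the first argmin, its distance, and the tie flag
theorem bfold_spec (x y : Int) (l : List (Int × Int)) :
    l.foldl (pv_best_step x y) (none, false) =
      match PySem.List.min? l (pv_dist (x, y)) with
      | none => (none, false)
      | some a => (some (a, pv_dist (x, y) a),
          decide (1 < (l.map (pv_dist (x, y))).countP (· == pv_dist (x, y) a))) := by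
  induction l using List.reverseRecOn with
  | nil => rfl
  | append_singleton l c ih =>
    rw [List.foldl_append, List.foldl_cons, List.foldl_nil, ih]
    cases h : PySem.List.min? l (pv_dist (x, y)) with
    | none =>
      have hl : l = [] := (PySem.List.min?_eq_none_iff _ _).mp h
      subst hl
      rw [min?_snoc_none c h]
      simp [pv_best_step, pv_dist_comm']
    | some a =>
      rw [min?_snoc_some c h]
      have hmem : pv_dist (x, y) a ∈ l.map (pv_dist (x, y)) :=
        List.mem_map_of_mem (PySem.List.min?_mem h)
      have hmin : ∀ v ∈ l.map (pv_dist (x, y)), pv_dist (x, y) a ≤ v := by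
        intro v hv
        rcases List.mem_map.mp hv with ⟨b, hb, rfl⟩
        exact PySem.List.min?_isMin h b hb
      rcases lt_trichotomy (pv_dist (x, y) c) (pv_dist (x, y) a) with hlt | heq | hgt
      · rw [if_pos hlt]
        have hcount : ((l ++ [c]).map (pv_dist (x, y))).countP (· == pv_dist (x, y) c) = 1 := by
          rw [List.map_append, List.countP_append]
          have h0 : (l.map (pv_dist (x, y))).countP (· == pv_dist (x, y) c) = 0 := by
            rw [List.countP_eq_zero]
            intro v hv
            have := hmin v hv
            simp only [beq_iff_eq]
            omega
          rw [h0]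
          simp
        simp only [pv_best_step, pv_dist_comm', hcount]
        simp [hlt]
      · rw [if_neg (by omega)]
        have hcount : 1 < ((l ++ [c]).map (pv_dist (x, y))).countP (· == pv_dist (x, y) a) := by
          rw [List.map_append, List.countP_append]
          have h1 : 0 < (l.map (pv_dist (x, y))).countP (· == pv_dist (x, y) a) :=
            List.countP_pos_iff.mpr ⟨_, hmem, by simp⟩
          have h2 : ([c].map (pv_dist (x, y))).countP (· == pv_dist (x, y) a) = 1 := by
            simp [heq]
          omega
        simp only [pv_best_step, pv_dist_comm', heq]
        rw [if_neg (lt_irrefl _)]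
        simp only [beq_self_eq_true, if_true]
        rw [decide_eq_true hcount]
      · rw [if_neg (by omega)]
        have hcount : ((l ++ [c]).map (pv_dist (x, y))).countP (· == pv_dist (x, y) a)
            = (l.map (pv_dist (x, y))).countP (· == pv_dist (x, y) a) := by
          rw [List.map_append, List.countP_append]
          have h2 : ([c].map (pv_dist (x, y))).countP (· == pv_dist (x, y) a) = 0 := by
            simp only [List.map_cons, List.map_nil, List.countP_cons, List.countP_nil]
            simp only [beq_iff_eq]
            rw [if_neg (by omega)]
          omega
        have hne : (pv_dist (x, y) c == pv_dist (x, y) a) = false := by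
          simp only [beq_eq_false_iff_ne]; omega
        simp only [pv_best_step, pv_dist_comm']
        rw [if_neg (not_lt.mpr (le_of_lt hgt)), hne]
        simp only [Bool.false_eq_true, if_false]
        rw [hcount]

-- A's labelling loop appends the first key whose value equals `closest`
theorem label_loop_eq (pt closest : Int × Int) (plot : List String)
    (L : List (String × Int × Int)) :
    pv_label_loop pt closest plot L =
      match L.find? (fun p => p.2 == closest) with
      | none => plot
      | some p => plot ++ [if closest == pt then p.1 else PySem.Str.lower p.1] := by
  induction L with
  | nil => rfl
  | cons p rest ih =>
    obtain ⟨k, v⟩ := p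
    by_cases hv : v = closest
    · subst hv
      simp [pv_label_loop]
      split <;> rfl
    · have hvb : (v == closest) = false := by simp [hv]
      simp [pv_label_loop, hvb, ih]

-- the first-wins label dict: lookup is the first matching pair of the list
theorem get?_labelfold (L : List (String × Int × Int)) :
    ∀ (d0 : PySem.Dict (Int × Int) String) (c : Int × Int),
    (L.foldl (fun d p => if d.contains p.2 then d else d.insert p.2 p.1) d0).get? c
      = (d0.get? c).or ((L.find? (fun p => p.2 == c)).map (fun p => p.1)) := by
  induction L with
  | nil => intro d0 c; simp
  | cons p rest ih =>
    intro d0 c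
    simp only [List.foldl_cons]
    by_cases hcont : d0.contains p.2 = true
    · rw [if_pos hcont, ih]
      by_cases hpc : p.2 = c
      · subst hpc
        have hsome : (d0.get? p.2).isSome := by
          rw [← PySem.Dict.contains_eq_isSome_get?]; exact hcont
        rw [List.find?_cons_of_pos (by simp)]
        rcases Option.isSome_iff_exists.mp hsome with ⟨v, hv⟩
        rw [hv]
        cases hrest : (rest.find? (fun q => q.2 == p.2)).map (fun q => q.1) <;> rfl
      · rw [List.find?_cons_of_neg (by simp [hpc])]
    · rw [if_neg hcont, ih]
      by_cases hpc : p.2 = c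
      · subst hpc
        have hnone : d0.get? p.2 = none := by
          rw [← Option.not_isSome_iff_eq_none, ← PySem.Dict.contains_eq_isSome_get?]
          simp [hcont]
        rw [PySem.Dict.get?_insert_self, List.find?_cons_of_pos (by simp), hnone]
        rfl
      · rw [PySem.Dict.get?_insert_of_ne d0 p.1 (fun h => hpc h.symm), List.find?_cons_of_neg (by simp [hpc])]

-- the label dict's keys: first occurrences of the values, in order
theorem keys_labelfold (L : List (String × Int × Int)) :
    ∀ (d0 : PySem.Dict (Int × Int) String),
    (L.foldl (fun d p => if d.contains p.2 then d else d.insert p.2 p.1) d0).keys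
      = PySem.Set.update d0.keys (L.map (fun p => p.2)) := by
  induction L with
  | nil => intro d0; rfl
  | cons p rest ih =>
    intro d0
    simp only [List.foldl_cons, List.map_cons, PySem.Set.update]
    by_cases hcont : d0.contains p.2 = true
    · rw [if_pos hcont, ih]
      have : PySem.Set.add d0.keys p.2 = d0.keys := by
        simp only [PySem.Set.add, PySem.Set.contains_eq_decide,
          decide_eq_true ((PySem.Dict.contains_iff_mem_keys d0 p.2).mp hcont), if_true]
      rw [this]
      rfl
    · rw [if_neg hcont, ih]
      have hmem : p.2 ∉ d0.keys := by
        intro hm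
        exact absurd ((PySem.Dict.contains_iff_mem_keys d0 p.2).mpr hm) (by simp [hcont])
      have : PySem.Set.add d0.keys p.2 = d0.keys ++ [p.2] := by
        simp only [PySem.Set.add, PySem.Set.contains_eq_decide, hmem, decide_false,
          Bool.false_eq_true, if_false]
      rw [PySem.Dict.keys_insert_of_not_contains _ _ (by simp [hcont]), this]
      rfl

-- per-cell agreement of the two ports
theorem cell_eq (L : List (String × Int × Int)) (x y : Int) (plot : List String) :
    (match find_closest (x, y) (L.map (fun p => p.2)) with
      | some closest => pv_label_loop (x, y) closest plot L
      | none => plot ++ ["."]) =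
    (match ((L.foldl (fun d p => if d.contains p.2 then d else d.insert p.2 p.1)
        PySem.Dict.empty).keys).foldl (pv_best_step x y) (none, false) with
      | (none, _) => plot ++ ["."]
      | (some (b, _), tie) =>
          if tie then plot ++ ["."]
          else if b == (x, y) then
            plot ++ [(L.foldl (fun d p => if d.contains p.2 then d else d.insert p.2 p.1)
              PySem.Dict.empty).getD b ""]
          else plot ++ [PySem.Str.lower ((L.foldl (fun d p =>
            if d.contains p.2 then d else d.insert p.2 p.1) PySem.Dict.empty).getD b "")]) := by
  have hkeys : ((L.foldl (fun d p => if d.contains p.2 then d else d.insert p.2 p.1)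
      PySem.Dict.empty).keys) = PySem.List.dedup (L.map (fun p => p.2)) := by
    rw [keys_labelfold, PySem.List.dedup_eq_ofList]; rfl
  have hget : ∀ b : Int × Int,
      (L.foldl (fun d p => if d.contains p.2 then d else d.insert p.2 p.1)
        PySem.Dict.empty).getD b ""
      = ((L.find? (fun p => p.2 == b)).map (fun p => p.1)).getD "" := by
    intro b
    show ((L.foldl (fun d p => if d.contains p.2 then d else d.insert p.2 p.1)
        PySem.Dict.empty).get? b).getD "" = _
    rw [get?_labelfold]
    rfl
  have hfind : ∀ b : Int × Int, b ∈ L.map (fun p => p.2) →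
      ∃ p₀, L.find? (fun p => p.2 == b) = some p₀ := by
    intro b hb
    rcases List.mem_map.mp hb with ⟨p, hpL, hp2⟩
    have hps : ((fun q : String × Int × Int => q.2 == b) p) = true := beq_iff_eq.mpr hp2
    exact Option.isSome_iff_exists.mp (List.find?_isSome.mpr ⟨p, hpL, hps⟩)
  rw [hkeys, bfold_spec]
  by_cases hpt : (x, y) ∈ L.map (fun p => p.2)
  · -- the cell is one of the coordinates
    have hfc : find_closest (x, y) (L.map (fun p => p.2)) = some (x, y) := by
      unfold find_closest
      rw [fc_loop_zero _ _ hpt]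
    have hptds : (x, y) ∈ PySem.List.dedup (L.map (fun p => p.2)) :=
      (PySem.List.mem_dedup _ _).mpr hpt
    obtain ⟨a, ha⟩ : ∃ a, PySem.List.min? (PySem.List.dedup (L.map (fun p => p.2)))
        (pv_dist (x, y)) = some a := by
      cases h : PySem.List.min? (PySem.List.dedup (L.map (fun p => p.2))) (pv_dist (x, y)) with
      | none =>
        have := (PySem.List.min?_eq_none_iff _ _).mp h
        rw [this] at hptds; cases hptds
      | some a => exact ⟨a, rfl⟩
    have hfa0 : pv_dist (x, y) a = 0 := by
      have h1 := PySem.List.min?_isMin ha _ hptds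
      have h2 : pv_dist (x, y) (x, y) = 0 := by simp [pv_dist]
      have h3 := pv_dist_nonneg (x, y) a
      omega
    have hapt : a = (x, y) := (pv_dist_eq_zero _ _).mp hfa0
    subst hapt
    rw [hfc, ha]
    have hcnt0 : ((PySem.List.dedup (L.map (fun p => p.2))).map (pv_dist (x, y))).countP
        (· == (0 : Int)) = 1 := by
      rw [List.countP_map]
      rw [List.countP_congr (q := (· == (x, y)))
        (by intro c _; simp [Function.comp, pv_dist_eq_zero])]
      rw [← List.count_eq_countP]
      exact List.count_eq_one_of_mem (PySem.List.nodup_dedup _) hptds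
    obtain ⟨p₀, hp₀⟩ := hfind _ hpt
    simp only [label_loop_eq, hp₀, hget, hfa0, hcnt0]
    simp
  · -- the cell is not a coordinate: A completes the dict and takes the unique min
    have hitems : ((L.map (fun p => p.2)).foldl
        (fun d c => d.insert c (pv_dist (x, y) c)) PySem.Dict.empty).items
        = (PySem.List.dedup (L.map (fun p => p.2))).map (fun c => (c, pv_dist (x, y) c)) := by
      have h := items_fold_insert (pv_dist (x, y)) (L.map (fun p => p.2)) []
      simpa [PySem.List.dedup_eq_ofList, PySem.Set.ofList, PySem.Set.update] using h
    have hvalues : ((L.map (fun p => p.2)).foldl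
        (fun d c => d.insert c (pv_dist (x, y) c)) PySem.Dict.empty).values
        = (PySem.List.dedup (L.map (fun p => p.2))).map (pv_dist (x, y)) := by
      show ((L.map (fun p => p.2)).foldl
        (fun d c => d.insert c (pv_dist (x, y) c)) PySem.Dict.empty).items.map (fun p => p.2) = _
      rw [hitems, List.map_map]
      rfl
    have hfc : find_closest (x, y) (L.map (fun p => p.2)) =
        (match PySem.List.min? ((L.map (fun p => p.2)).foldl
            (fun d c => d.insert c (pv_dist (x, y) c)) PySem.Dict.empty).items (fun p => p.2) with
          | none => none
          | some mindist =>
            if 1 < ((((L.map (fun p => p.2)).foldl (fun d c => d.insert c (pv_dist (x, y) c))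
                PySem.Dict.empty).values).filter (fun d => d == mindist.2)).length
            then none else some mindist.1) := by
      unfold find_closest
      rw [fc_loop_no_zero _ _ hpt]
    cases hmin : PySem.List.min? (PySem.List.dedup (L.map (fun p => p.2))) (pv_dist (x, y)) with
    | none =>
      have hmp : PySem.List.min? ((L.map (fun p => p.2)).foldl
          (fun d c => d.insert c (pv_dist (x, y) c)) PySem.Dict.empty).items
          (fun p => p.2) = none := by
        rw [hitems, min?_map_pair, hmin]; rfl
      rw [hfc, hmp]
    | some a =>
      have hmp : PySem.List.min? ((L.map (fun p => p.2)).foldl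
          (fun d c => d.insert c (pv_dist (x, y) c)) PySem.Dict.empty).items
          (fun p => p.2) = some (a, pv_dist (x, y) a) := by
        rw [hitems, min?_map_pair, hmin]; rfl
      have hads : a ∈ PySem.List.dedup (L.map (fun p => p.2)) := PySem.List.min?_mem hmin
      have havals : a ∈ L.map (fun p => p.2) := (PySem.List.mem_dedup _ _).mp hads
      have hane : (a == (x, y)) = false := by
        simp only [beq_eq_false_iff_ne]
        rintro rfl; exact hpt havals
      have hfc2 : find_closest (x, y) (L.map (fun p => p.2)) =
          if 1 < ((PySem.List.dedup (L.map (fun p => p.2))).map (pv_dist (x, y))).countP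
              (· == pv_dist (x, y) a) then none else some a := by
        rw [hfc, hmp, hvalues]
        simp [List.countP_eq_length_filter]
      rw [hfc2]
      obtain ⟨p₀, hp₀⟩ := hfind _ havals
      by_cases hc : 1 < ((PySem.List.dedup (L.map (fun p => p.2))).map
          (pv_dist (x, y))).countP (· == pv_dist (x, y) a)
      · rw [if_pos hc]
        simp only [decide_eq_true hc]
        rfl
      · rw [if_neg hc]
        simp only [decide_eq_false hc, label_loop_eq, hp₀, hget, hane]
        simp

-- ===== VERDICT (by name: the statement is the Claim_ definition above) =====
theorem get_plot_spec : Claim_equal_get_plot := by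
  unfold Claim_equal_get_plot
  intro L x0 x1 y0 y1 _ _
  unfold Spec_get_plot get_plot get_plot_alt
  simp only []
  congr 1
  funext plot y
  congr 1
  funext plot' x
  exact cell_eq L x y plot'
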